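-- pv_equiv track=rewrite | github.com/Riki-Arai/algorithm_study | full_search/not_own_answer_code/digits_in_multiplication.py | min_digit_length
-- ===== SOURCE A (Python) =====
-- def min_digit_length(N):
--     import math
--
--     # 初期化: 最悪の場合はN自体の桁数になる
--     min_digits = len(str(N))
--
--     # Aを1から√Nまでループ
--     for A in range(1, int(math.sqrt(N)) + 1):
--         if N % A == 0:
--             # Bは対応するもう一方の因数
--             B = N // A
--             # 桁数を比較して小さい方を保持
--             min_digits = min(min_digits, max(len(str(A)), len(str(B))))
--
--     return min_digits
-- ===== SOURCE B (Python) =====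
-- def min_digit_length(N):
--     import math
--
--     # N == 0 has no factor pair with A >= 1; the answer is len(str(0)) = 1
--     if N == 0:
--         return 1
--
--     # For a divisor A <= sqrt(N) the partner B = N // A satisfies B >= A, so the
--     # max digit count of the pair is just len(str(B)), and it is smallest for the
--     # largest such A: scan downward and return at the first divisor found.
--     for A in range(int(math.sqrt(N)), 0, -1):
--         if N % A == 0:
--             return len(str(N // A))
-- ===== Notes on version B (the rewrite author's own statement) =====
-- stated objective: simpler
-- what changed: Instead of scanning all A in 1..sqrt(N) with a running min of max(len(str(A)), len(str(N//A))), B scans downward from int(sqrt(N)) and returns len(str(N//A)) at the first divisor found, exploiting that the partner N//A is always the longer factor and its digit count shrinks as A grows; no min accumulator, one digit count, early exit.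
import Mathlib
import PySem

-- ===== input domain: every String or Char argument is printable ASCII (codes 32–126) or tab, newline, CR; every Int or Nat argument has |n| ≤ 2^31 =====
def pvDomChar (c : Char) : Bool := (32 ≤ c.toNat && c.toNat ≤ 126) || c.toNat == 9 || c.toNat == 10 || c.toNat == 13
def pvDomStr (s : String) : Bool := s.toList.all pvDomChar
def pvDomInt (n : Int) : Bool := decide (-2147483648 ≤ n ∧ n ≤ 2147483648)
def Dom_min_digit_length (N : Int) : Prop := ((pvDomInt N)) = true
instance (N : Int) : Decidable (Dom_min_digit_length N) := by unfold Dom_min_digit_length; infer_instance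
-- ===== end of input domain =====

-- B replaces A's full 1..√N scan with a min-accumulator by a downward scan from ⌊√N⌋ that
-- returns len(str(N // A)) at the FIRST divisor found (objective: simpler — no accumulator,
-- one digit count, early exit).

-- len(str(x)) — shared literal transliteration of the digit-count expression both Pythons write
def pyDigitCount (x : Int) : Int := PySem.Str.len (PySem.Int.toStr x)

-- int(math.sqrt(N)): exact equal to isqrt(N) for 0 ≤ N ≤ 2^31 (the double sqrt is correctly
-- rounded there); negative N raises ValueError in Python — excluded by Pre_min_digit_length
def pySqrtInt (N : Int) : Int := ((Nat.sqrt N.toNat : Nat) : Int)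

-- ===== PORT A =====
def min_digit_length (N : Int) : Int :=
  (PySem.List.pyRange 1 (pySqrtInt N + 1) 1).foldl
    (fun min_digits A =>
      if PySem.Int.mod N A = 0 then
        min min_digits (max (pyDigitCount A) (pyDigitCount (PySem.Int.floordiv N A)))
      else min_digits)
    (pyDigitCount N)

-- ===== PORT B =====
-- the `.getD 0` totalizes Python's fall-off-the-end (returning None); it is unreachable for
-- N ≥ 1 since A = 1 always divides N
def min_digit_length_alt (N : Int) : Int :=
  if N = 0 then 1
  else
    ((PySem.List.pyRange (pySqrtInt N) 0 (-1)).findSome?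
        (fun A =>
          if PySem.Int.mod N A = 0 then some (pyDigitCount (PySem.Int.floordiv N A))
          else none)).getD 0

-- ===== PRECONDITION & SPEC =====
-- Pre_ excludes exactly N < 0, where math.sqrt raises ValueError in both A and B
def Pre_min_digit_length (N : Int) : Prop := 0 ≤ N
instance (N : Int) : Decidable (Pre_min_digit_length N) := by unfold Pre_min_digit_length; infer_instance
def pvWitness_min_digit_length : Int := 12

def Spec_min_digit_length (N : Int) (out : Int) : Prop := out = min_digit_length_alt N
instance (N : Int) (out : Int) : Decidable (Spec_min_digit_length N out) := by unfold Spec_min_digit_length; infer_instance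

-- ===== CLAIM (what is proved, stated in full; the proofs are below) =====
def Claim_equal_min_digit_length : Prop := ∀ (N : Int), Dom_min_digit_length N → Pre_min_digit_length N → Spec_min_digit_length N (min_digit_length N)

-- ===== LEMMAS AND PROOFS =====

-- length of Nat.toDigitsCore with enough fuel: one char per decimal digit
lemma pvToDigitsCoreLen (b : Nat) (hb : 2 ≤ b) :
    ∀ (f n : Nat) (l : List Char), n < f →
      (Nat.toDigitsCore b f n l).length = l.length + Nat.log b n + 1 := by
  intro f
  induction f with
  | zero => intro n l h; omega
  | succ f ih =>
    intro n l h
    simp only [Nat.toDigitsCore]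
    by_cases hx : n / b = 0
    · have hnb : n < b := by
        rcases (Nat.div_eq_zero_iff).mp hx with h0 | h1
        · omega
        · exact h1
      have : Nat.log b n = 0 := Nat.log_eq_zero_iff.mpr (Or.inl hnb)
      simp [hx, this]
    · have hbn : b ≤ n := by
        by_contra hc
        exact hx (Nat.div_eq_zero_iff.mpr (Or.inr (by omega)))
      have hpos : 0 < n := by omega
      have hlt : n / b < f := lt_of_lt_of_le (Nat.div_lt_self hpos (by omega)) (by omega)
      simp only [hx, if_false]
      rw [ih (n / b) _ hlt]
      have hlog : Nat.log b (n / b) = Nat.log b n - 1 := Nat.log_div_base b n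
      have hlogpos : 0 < Nat.log b n := Nat.log_pos (by omega) hbn
      simp [hlog]
      omega

lemma pvDigitCount_eq (x : Int) (hx : 0 ≤ x) :
    pyDigitCount x = (Nat.log 10 x.toNat : Int) + 1 := by
  unfold pyDigitCount
  have hneg : ¬ x < 0 := by omega
  simp [PySem.Int.toStr, PySem.Int.toChars, hneg, PySem.Str.len_eq, Nat.toDigits]
  rw [pvToDigitsCoreLen 10 (by norm_num) _ _ _ (Nat.lt_succ_self _)]
  simp

lemma pvDigitCount_mono {x y : Int} (hx : 0 ≤ x) (hxy : x ≤ y) :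
    pyDigitCount x ≤ pyDigitCount y := by
  rw [pvDigitCount_eq x hx, pvDigitCount_eq y (le_trans hx hxy)]
  have : Nat.log 10 x.toNat ≤ Nat.log 10 y.toNat :=
    Nat.log_mono_right (by omega)
  omega

-- the shared loop body of A's fold, named for the induction
def pvStep (N : Int) (min_digits A : Int) : Int :=
  if PySem.Int.mod N A = 0 then
    min min_digits (max (pyDigitCount A) (pyDigitCount (PySem.Int.floordiv N A)))
  else min_digits

-- the shared body of B's scan
def pvPick (N : Int) (A : Int) : Option Int :=
  if PySem.Int.mod N A = 0 then some (pyDigitCount (PySem.Int.floordiv N A)) else none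

-- joint invariant: after scanning 1..k (A, upward fold) resp. k..1 (B, downward first match),
-- both sides carry len(str(N // a)) for some divisor a ≤ k
lemma pvInvariant (N : Int) (hN : 1 ≤ N) :
    ∀ (j : Nat), ((j : Int) + 1) * ((j : Int) + 1) ≤ N →
      ∃ a : Int, 1 ≤ a ∧ a ≤ (j : Int) + 1 ∧ a ∣ N ∧
        (PySem.List.pyRange ((j : Int) + 1) 0 (-1)).findSome? (pvPick N)
          = some (pyDigitCount (PySem.Int.floordiv N a)) ∧
        (PySem.List.pyRange 1 ((j : Int) + 1 + 1) 1).foldl (pvStep N) (pyDigitCount N)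
          = pyDigitCount (PySem.Int.floordiv N a) := by
  intro j
  induction j with
  | zero =>
    intro _
    refine ⟨1, le_refl _, by norm_num, one_dvd N, ?_, ?_⟩
    · rw [PySem.List.pyRange_neg_one_cons (by norm_num), PySem.List.pyRange_neg_one_eq_nil (by norm_num)]
      simp [pvPick]
    · have h11 : ((0 : Nat) : Int) + 1 + 1 = (1 : Int) + 1 := by norm_num
      rw [h11, PySem.List.pyRange_one_singleton]
      have h1 : PySem.Int.floordiv N 1 = N := by
        rw [PySem.Int.floordiv_eq_ediv_of_pos (by norm_num)]; simp
      simp [pvStep]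
  | succ j ih =>
    intro hk
    have hcast : ((j + 1 : Nat) : Int) + 1 = (j : Int) + 1 + 1 := by push_cast; ring
    rw [hcast] at hk ⊢
    set k : Int := (j : Int) + 1 + 1 with hkdef
    have hkpos : 0 < k := by omega
    have hsq : ((j : Int) + 1) * ((j : Int) + 1) ≤ N := by
      have : (0:Int) ≤ (j : Int) := by positivity
      nlinarith
    obtain ⟨a, ha1, hale, hadvd, hfind, hfold⟩ := ih hsq
    have hcons : PySem.List.pyRange k 0 (-1) = k :: PySem.List.pyRange (k - 1) 0 (-1) :=
      PySem.List.pyRange_neg_one_cons (by omega)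
    have hk1 : k - 1 = (j : Int) + 1 := by omega
    have happ : PySem.List.pyRange 1 (k + 1) 1 = PySem.List.pyRange 1 k 1 ++ [k] :=
      PySem.List.pyRange_one_succ_right (by omega)
    by_cases hdvd : k ∣ N
    · -- k is a new, larger divisor: both sides switch to len(str(N // k))
      have hNk : PySem.Int.floordiv N k = N / k := PySem.Int.floordiv_eq_ediv_of_pos hkpos
      have hNa : PySem.Int.floordiv N a = N / a := PySem.Int.floordiv_eq_ediv_of_pos (by omega)
      have hkle : k ≤ PySem.Int.floordiv N k :=
        (PySem.Int.le_floordiv_iff_mul_le (by omega)).mpr hk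
      have hdivle : PySem.Int.floordiv N k ≤ PySem.Int.floordiv N a := by
        rw [hNk, hNa]
        rw [Int.le_ediv_iff_mul_le (by omega : (0:Int) < a)]
        calc N / k * a ≤ N / k * k := by
              have h0 : 0 ≤ N / k := Int.ediv_nonneg (by omega) (by omega)
              exact mul_le_mul_of_nonneg_left (by omega) h0
          _ ≤ N := Int.ediv_mul_le N (by omega)
      have hmax : max (pyDigitCount k) (pyDigitCount (PySem.Int.floordiv N k))
          = pyDigitCount (PySem.Int.floordiv N k) :=
        max_eq_right (pvDigitCount_mono (by omega) hkle)
      have hmin : pyDigitCount (PySem.Int.floordiv N k) ≤ pyDigitCount (PySem.Int.floordiv N a) :=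
        pvDigitCount_mono (by rw [hNk]; exact Int.ediv_nonneg (by omega) (by omega)) hdivle
      refine ⟨k, by omega, le_refl _, hdvd, ?_, ?_⟩
      · rw [hcons]
        simp [pvPick, PySem.Int.mod_eq_zero_iff_dvd, hdvd]
      · rw [happ, List.foldl_append, hfold]
        simp [pvStep, PySem.Int.mod_eq_zero_iff_dvd, hdvd, hmax]
        omega
    · -- k does not divide N: both sides keep the previous value
      refine ⟨a, ha1, by omega, hadvd, ?_, ?_⟩
      · rw [hcons]
        rw [hk1] at *
        simp [pvPick, PySem.Int.mod_eq_zero_iff_dvd, hdvd, hfind]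
      · rw [happ, List.foldl_append, hfold]
        simp [pvStep, PySem.Int.mod_eq_zero_iff_dvd, hdvd]

-- ===== VERDICT (by name: the statement is the Claim_ definition above) =====
theorem min_digit_length_spec : Claim_equal_min_digit_length := by
  intro N _ hPre
  unfold Spec_min_digit_length
  by_cases h0 : N = 0
  · subst h0
    have hd0 : pyDigitCount 0 = 1 := by rw [pvDigitCount_eq 0 le_rfl]; simp
    unfold min_digit_length min_digit_length_alt
    rw [show pySqrtInt 0 + 1 = 1 by unfold pySqrtInt; norm_num]
    rw [PySem.List.pyRange_one_eq_nil le_rfl]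
    simp [hd0]
  · have hN : 1 ≤ N := by unfold Pre_min_digit_length at hPre; omega
    have hrpos : 0 < Nat.sqrt N.toNat := Nat.sqrt_pos.mpr (by omega)
    obtain ⟨j, hj⟩ : ∃ j : Nat, Nat.sqrt N.toNat = j + 1 :=
      ⟨Nat.sqrt N.toNat - 1, by omega⟩
    have hsq : ((j : Int) + 1) * ((j : Int) + 1) ≤ N := by
      have h := Nat.sqrt_le' N.toNat
      rw [hj] at h
      have h2 : (((j + 1) ^ 2 : Nat) : Int) ≤ (N.toNat : Int) := by exact_mod_cast h
      rw [Int.toNat_of_nonneg (by omega : (0:Int) ≤ N)] at h2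
      push_cast at h2
      nlinarith
    obtain ⟨a, _, _, _, hfind, hfold⟩ := pvInvariant N hN j hsq
    have hr : pySqrtInt N = (j : Int) + 1 := by
      unfold pySqrtInt; rw [hj]; push_cast; ring
    unfold min_digit_length min_digit_length_alt
    rw [hr]
    simp only [h0, if_false]
    rw [show ((PySem.List.pyRange ((j:Int)+1) 0 (-1)).findSome? fun A =>
          if PySem.Int.mod N A = 0 then some (pyDigitCount (PySem.Int.floordiv N A)) else none)
        = (PySem.List.pyRange ((j:Int)+1) 0 (-1)).findSome? (pvPick N) from rfl]
    rw [hfind]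
    rw [show ((PySem.List.pyRange 1 ((j:Int)+1+1) 1).foldl (fun min_digits A =>
          if PySem.Int.mod N A = 0 then
            min min_digits (max (pyDigitCount A) (pyDigitCount (PySem.Int.floordiv N A)))
          else min_digits) (pyDigitCount N))
        = (PySem.List.pyRange 1 ((j:Int)+1+1) 1).foldl (pvStep N) (pyDigitCount N) from rfl]
    rw [hfold]
    rfl
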